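-- pv_equiv track=rewrite | github.com/Shao-Group/beaver-test | train/train_test_real.py | continuous_non_zero
-- ===== SOURCE A (Python) =====
-- def continuous_non_zero(values):
--     """Calculate max and min continuous non-zero values."""
--     if not values:
--         return 0, 0
--
--     counts = []
--     current_count = 0
--
--     for v in values:
--         if v != 0:
--             current_count += 1
--         else:
--             if current_count > 0:
--                 counts.append(current_count)
--                 current_count = 0
--
--     if current_count > 0:
--         counts.append(current_count)
--
--     if not counts:
--         return 0, 0
--
--     return max(counts), min(counts)
-- ===== SOURCE B (Python) =====
-- def continuous_non_zero(values):
--     """Calculate max and min continuous non-zero values."""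
--     zeros = [-1] + [i for i, v in enumerate(values) if v == 0] + [len(values)]
--     runs = [b - a - 1 for a, b in zip(zeros, zeros[1:]) if b - a > 1]
--     if not runs:
--         return 0, 0
--     return max(runs), min(runs)
-- ===== Notes on version B (the rewrite author's own statement) =====
-- stated objective: alternative
-- what changed: Replaces the carried-counter loop with a boundary-based algorithm: collect the zero positions (with -1 and len(values) as sentinels) and obtain each non-zero run length as the gap between consecutive boundaries.
import Mathlib
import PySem

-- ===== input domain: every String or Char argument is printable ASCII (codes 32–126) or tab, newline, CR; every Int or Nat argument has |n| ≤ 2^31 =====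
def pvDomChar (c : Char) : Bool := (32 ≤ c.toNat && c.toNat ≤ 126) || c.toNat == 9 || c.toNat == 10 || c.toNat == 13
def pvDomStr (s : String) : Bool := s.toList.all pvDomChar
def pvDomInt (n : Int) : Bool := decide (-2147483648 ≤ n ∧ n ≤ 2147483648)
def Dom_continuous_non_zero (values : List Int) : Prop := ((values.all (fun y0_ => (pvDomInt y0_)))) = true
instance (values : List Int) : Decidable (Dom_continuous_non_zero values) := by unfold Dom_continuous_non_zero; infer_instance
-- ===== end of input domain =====

-- B replaces A's carried-counter loop by a boundary-gap algorithm (zero positions with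
-- sentinels; run lengths are the gaps between consecutive boundaries); same cost, alternative structure.

-- ===== PORT A =====
-- loop body of A's for-loop (carried state: counts so far, current run counter)
def pvStepA (st : List Int × Int) (v : Int) : List Int × Int :=
  if v ≠ 0 then (st.1, st.2 + 1)
  else if st.2 > 0 then (st.1 ++ [st.2], 0) else (st.1, st.2)

def continuous_non_zero (values : List Int) : Int × Int :=
  if values = [] then (0, 0)
  else
    let s := values.foldl pvStepA ([], 0)
    let counts := if s.2 > 0 then s.1 ++ [s.2] else s.1
    if counts = [] then (0, 0)
    else ((PySem.List.max? counts (fun x => x)).getD 0,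
          (PySem.List.min? counts (fun x => x)).getD 0)

-- ===== PORT B =====
-- Source B's local `zeros`: [-1] + [i for i, v in enumerate(values) if v == 0] + [len(values)]
def pvZerosB (values : List Int) : List Int :=
  [-1] ++ ((PySem.List.enumerate values).filterMap
            (fun p => if p.2 = 0 then some p.1 else none)) ++ [(values.length : Int)]

-- Source B's local `runs`: [b - a - 1 for a, b in zip(zeros, zeros[1:]) if b - a > 1]
def pvRunsB (values : List Int) : List Int :=
  ((pvZerosB values).zip (PySem.List.slice (pvZerosB values) (some 1) none)).filterMap
    (fun p => if p.2 - p.1 > 1 then some (p.2 - p.1 - 1) else none)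

def continuous_non_zero_alt (values : List Int) : Int × Int :=
  if pvRunsB values = [] then (0, 0)
  else ((PySem.List.max? (pvRunsB values) (fun x => x)).getD 0,
        (PySem.List.min? (pvRunsB values) (fun x => x)).getD 0)

-- ===== PRECONDITION & SPEC =====
def Spec_continuous_non_zero (values : List Int) (out : Int × Int) : Prop := out = continuous_non_zero_alt values
instance (values : List Int) (out : Int × Int) : Decidable (Spec_continuous_non_zero values out) := by unfold Spec_continuous_non_zero; infer_instance

-- ===== CLAIM (what is proved, stated in full; the proofs are below) =====
def Claim_equal_continuous_non_zero : Prop := ∀ (values : List Int), Dom_continuous_non_zero values → Spec_continuous_non_zero values (continuous_non_zero values)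

-- ===== LEMMAS AND PROOFS =====

-- reference run-length list: pvRuns vs c = run lengths of vs given a carried current count c
def pvRuns (vs : List Int) (c : Int) : List Int :=
  match vs with
  | [] => if c > 0 then [c] else []
  | v :: vs' => if v ≠ 0 then pvRuns vs' (c + 1)
                else if c > 0 then c :: pvRuns vs' 0 else pvRuns vs' c

-- zero positions of vs when its first element has index i
def pvZeros (vs : List Int) (i : Int) : List Int :=
  match vs with
  | [] => []
  | v :: vs' => if v = 0 then i :: pvZeros vs' (i + 1) else pvZeros vs' (i + 1)

-- gaps > 1 between consecutive boundaries in prev :: zs ++ [n], minus one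
def pvGaps (prev : Int) (zs : List Int) (n : Int) : List Int :=
  match zs with
  | [] => if n - prev > 1 then [n - prev - 1] else []
  | z :: zs' => (if z - prev > 1 then [z - prev - 1] else []) ++ pvGaps z zs' n

theorem pvFoldA (vs : List Int) : ∀ (acc : List Int) (c : Int),
    (if (List.foldl pvStepA (acc, c) vs).2 > 0
      then (List.foldl pvStepA (acc, c) vs).1 ++ [(List.foldl pvStepA (acc, c) vs).2]
      else (List.foldl pvStepA (acc, c) vs).1) = acc ++ pvRuns vs c := by
  induction vs with
  | nil =>
    intro acc c
    simp only [List.foldl_nil, pvRuns]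
    split_ifs <;> simp
  | cons v vs ih =>
    intro acc c
    simp only [List.foldl_cons, pvRuns]
    by_cases hv : v ≠ 0
    · rw [show pvStepA (acc, c) v = (acc, c + 1) by simp [pvStepA, hv]]
      rw [ih, if_pos hv]
    · by_cases hc : c > 0
      · rw [show pvStepA (acc, c) v = (acc ++ [c], 0) by simp [pvStepA, hv, hc]]
        rw [ih, if_neg hv, if_pos hc, List.append_assoc, List.singleton_append]
      · rw [show pvStepA (acc, c) v = (acc, c) by simp [pvStepA, hv, hc]]
        rw [ih, if_neg hv, if_neg hc]

theorem pvEnumZeros (vs : List Int) : ∀ (i : Int),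
    (PySem.List.enumerate vs i).filterMap (fun p => if p.2 = 0 then some p.1 else none)
      = pvZeros vs i := by
  induction vs with
  | nil => intro i; simp [PySem.List.enumerate_nil, pvZeros]
  | cons v vs ih =>
    intro i
    rw [PySem.List.enumerate_cons]
    by_cases hv : v = 0 <;> simp [pvZeros, hv, ih]

theorem pvZipGaps (zs : List Int) : ∀ (p n : Int),
    ((p :: (zs ++ [n])).zip (zs ++ [n])).filterMap
      (fun q => if q.2 - q.1 > 1 then some (q.2 - q.1 - 1) else none)
      = pvGaps p zs n := by
  induction zs with
  | nil =>
    intro p n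
    simp only [List.nil_append, List.zip_cons_cons, List.zip_nil_right, List.filterMap_cons,
      List.filterMap_nil, pvGaps]
    by_cases h : n - p > 1 <;> simp [h]
  | cons z zs ih =>
    intro p n
    simp only [List.cons_append, List.zip_cons_cons, List.filterMap_cons, pvGaps]
    by_cases h : z - p > 1
    · simp only [h, if_pos]
      rw [← ih z n]
      simp
    · simp only [h, ite_false]
      rw [← ih z n]
      simp

theorem pvGapsRuns (vs : List Int) : ∀ (i c : Int), 0 ≤ c →
    pvGaps (i - 1 - c) (pvZeros vs i) (i + vs.length) = pvRuns vs c := by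
  induction vs with
  | nil =>
    intro i c _
    simp only [pvZeros, pvGaps, pvRuns, List.length_nil, Int.natCast_zero, add_zero]
    split_ifs with h1 h2 h2
    · simp; omega
    · omega
    · omega
    · rfl
  | cons v vs ih =>
    intro i c hc0
    have hlen : i + ((v :: vs).length : Int) = (i + 1) + (vs.length : Int) := by
      simp only [List.length_cons]; push_cast; ring
    by_cases hv : v = 0
    · subst hv
      simp only [pvZeros, pvRuns, ite_true, ne_eq, not_true_eq_false, ite_false]
      rw [hlen]
      have htail : pvGaps i (pvZeros vs (i + 1)) ((i + 1) + (vs.length : Int)) = pvRuns vs 0 := by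
        have h := ih (i + 1) 0 (by omega)
        simpa using h
      simp only [pvGaps, htail]
      have hgap : i - (i - 1 - c) > 1 ↔ c > 0 := by omega
      by_cases hc : c > 0
      · rw [if_pos (hgap.mpr hc), if_pos hc]
        have : i - (i - 1 - c) - 1 = c := by omega
        rw [this, List.singleton_append]
      · rw [if_neg (fun h => hc (hgap.mp h)), if_neg hc, List.nil_append]
        have hc' : c = 0 := by omega
        rw [hc']
    · have hne : v ≠ 0 := hv
      simp only [pvZeros, hv, ite_false, pvRuns, if_pos hne]
      rw [hlen]
      have h4 : i - 1 - c = (i + 1) - 1 - (c + 1) := by ring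
      rw [h4, ih (i + 1) (c + 1) (by omega)]

theorem pvRunsB_eq (values : List Int) : pvRunsB values = pvRuns values 0 := by
  unfold pvRunsB pvZerosB
  rw [PySem.List.slice_from_one]
  rw [pvEnumZeros]
  have hd : ([-1] ++ pvZeros values 0 ++ [(values.length : Int)]).tail
      = pvZeros values 0 ++ [(values.length : Int)] := by simp
  rw [hd]
  have hz := pvZipGaps (pvZeros values 0) (-1) (values.length : Int)
  simp only [List.cons_append, List.nil_append] at hz ⊢
  rw [hz]
  have h := pvGapsRuns values 0 0 (by omega)
  simpa using h

-- ===== VERDICT (by name: the statement is the Claim_ definition above) =====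
theorem continuous_non_zero_spec : Claim_equal_continuous_non_zero := by
  intro values _
  unfold Spec_continuous_non_zero continuous_non_zero continuous_non_zero_alt
  by_cases hnil : values = []
  · subst hnil; decide
  · rw [if_neg hnil]
    simp only [pvRunsB_eq]
    have hA := pvFoldA values [] 0
    simp only [List.nil_append] at hA
    simp only [hA]
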